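-- pv_equiv track=rewrite | github.com/anuran-Chakraborty/JUCSE-Work | 3rd Year 2nd Sem/Networks/Assignment2/common.py | ins_error
-- ===== SOURCE A (Python) =====
-- def ins_error(frame, list_of_bit):
--
-- 	new=list(frame)
--
-- 	# Inserting error in the given bit position here
-- 	for i in range(len(list_of_bit)):
-- 		if(new[list_of_bit[i]]=='0'):
-- 			new[list_of_bit[i]]='1'
-- 		elif (new[list_of_bit[i]]=='1'):
-- 			new[list_of_bit[i]]='0'
-- 	new=''.join(new)
-- 	return new
-- ===== SOURCE B (Python) =====
-- def ins_error(frame, list_of_bit):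
--     # Build a parity (XOR) mask over positions, then apply it to the frame in one pass.
--     parity = [False] * len(frame)
--     for p in list_of_bit:
--         parity[p] ^= True
--     out = []
--     for b, c in zip(parity, frame):
--         if b and c == '0':
--             out.append('1')
--         elif b and c == '1':
--             out.append('0')
--         else:
--             out.append(c)
--     return ''.join(out)
-- ===== Notes on version B (the rewrite author's own statement) =====
-- stated objective: alternative
-- what changed: B replaces A's in-place per-position mutation of a char list with a two-phase algorithm: first a boolean parity (XOR) mask accumulated over the positions, then one zip pass over the frame applying the mask.
import Mathlib
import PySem

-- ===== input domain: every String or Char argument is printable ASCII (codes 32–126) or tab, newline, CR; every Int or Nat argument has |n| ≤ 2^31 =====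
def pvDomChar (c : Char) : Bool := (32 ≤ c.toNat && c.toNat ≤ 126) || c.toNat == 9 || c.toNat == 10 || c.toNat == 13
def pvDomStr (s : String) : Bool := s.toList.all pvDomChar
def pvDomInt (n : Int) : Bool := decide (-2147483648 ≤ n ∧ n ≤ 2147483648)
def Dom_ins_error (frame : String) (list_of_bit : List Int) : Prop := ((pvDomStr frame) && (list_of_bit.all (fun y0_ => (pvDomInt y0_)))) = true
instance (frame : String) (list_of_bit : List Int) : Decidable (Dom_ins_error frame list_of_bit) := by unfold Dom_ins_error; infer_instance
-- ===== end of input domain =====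

-- B builds a parity (XOR) mask over the flip positions first, then applies it to the
-- frame in a single separate pass, instead of A's in-place mutation per position.

-- ===== PORT A =====
-- A: mutate a char list, flipping '0'<->'1' at each listed position in order.
def ins_error (frame : String) (list_of_bit : List Int) : String :=
  let new0 := frame.toList
  let new :=
    (PySem.List.pyRange 0 (list_of_bit.length : Int) 1).foldl
      (fun new i =>
        let p := PySem.List.pyGetD list_of_bit i 0
        if PySem.List.pyGetD new p ' ' = '0' then PySem.List.pySetD new p '1'
        else if PySem.List.pyGetD new p ' ' = '1' then PySem.List.pySetD new p '0'
        else new)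
      new0
  String.ofList new

-- ===== PORT B =====
-- B: parity mask over positions, then one zip pass over the frame.
def ins_error_alt (frame : String) (list_of_bit : List Int) : String :=
  let parity :=
    list_of_bit.foldl
      (fun parity p =>
        PySem.List.pySetD parity p (!(PySem.List.pyGetD parity p false)))
      (List.replicate frame.toList.length false)
  String.ofList
    (List.zipWith
      (fun b c =>
        if b && (c = '0') then '1'
        else if b && (c = '1') then '0'
        else c)
      parity frame.toList)

-- ===== PRECONDITION & SPEC =====
-- Pre_: every listed position is a valid Python index into the frame; outside it A raises IndexError.
def Pre_ins_error (frame : String) (list_of_bit : List Int) : Prop :=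
  ∀ p ∈ list_of_bit, PySem.Raise.InRange frame.toList.length p
instance (frame : String) (list_of_bit : List Int) : Decidable (Pre_ins_error frame list_of_bit) := by
  unfold Pre_ins_error; infer_instance
def pvWitness_ins_error : String × List Int := ("10x01", [0, -1, 2, 0])

def Spec_ins_error (frame : String) (list_of_bit : List Int) (out : String) : Prop := out = ins_error_alt frame list_of_bit
instance (frame : String) (list_of_bit : List Int) (out : String) : Decidable (Spec_ins_error frame list_of_bit out) := by unfold Spec_ins_error; infer_instance

-- ===== CLAIM (what is proved, stated in full; the proofs are below) =====
def Claim_equal_ins_error : Prop := ∀ (frame : String) (list_of_bit : List Int), Dom_ins_error frame list_of_bit → Pre_ins_error frame list_of_bit → Spec_ins_error frame list_of_bit (ins_error frame list_of_bit)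

-- ===== LEMMAS AND PROOFS =====

-- resolved (non-negative) index of Python index p into a list of length n
def pvIdx (n : Nat) (p : Int) : Nat := if 0 ≤ p then p.toNat else n - (-p).toNat

lemma pvIdx_lt {n : Nat} {p : Int} (h : PySem.Raise.InRange n p) : pvIdx n p < n := by
  obtain ⟨h1, h2⟩ := h
  unfold pvIdx
  split <;> omega

lemma pyIdx?_eq {n : Nat} {p : Int} (h : PySem.Raise.InRange n p) :
    PySem.List.pyIdx? n p = some (pvIdx n p) := by
  obtain ⟨h1, h2⟩ := h
  simp only [PySem.List.pyIdx?, pvIdx]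
  split_ifs <;> rfl

lemma pyGetD_eq_getD {α : Type} {xs : List α} {p : Int} (d : α)
    (h : PySem.Raise.InRange xs.length p) :
    PySem.List.pyGetD xs p d = xs.getD (pvIdx xs.length p) d := by
  simp [PySem.List.pyGetD, PySem.List.pyGet?, pyIdx?_eq h, List.getD]

lemma pySetD_eq_set {α : Type} {xs : List α} {p : Int} (v : α)
    (h : PySem.Raise.InRange xs.length p) :
    PySem.List.pySetD xs p v = xs.set (pvIdx xs.length p) v := by
  simp [PySem.List.pySetD, PySem.List.pySet?, pyIdx?_eq h]

-- the character flip A performs at a position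
def pvFlip (c : Char) : Char := if c = '0' then '1' else if c = '1' then '0' else c

lemma pvFlip_flip (c : Char) : pvFlip (pvFlip c) = c := by
  unfold pvFlip; split_ifs <;> simp_all

-- applying a parity mask to the char list (B's second pass)
def pvApply (mask : List Bool) (cs : List Char) : List Char :=
  List.zipWith
    (fun b c =>
      if b && (c = '0') then '1'
      else if b && (c = '1') then '0'
      else c)
    mask cs

lemma pvApply_length (mask : List Bool) (cs : List Char) (h : mask.length = cs.length) :
    (pvApply mask cs).length = cs.length := by
  simp [pvApply, h]

lemma pvApply_getElem (mask : List Bool) (cs : List Char) (h : mask.length = cs.length)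
    {i : Nat} (hi : i < cs.length) :
    (pvApply mask cs)[i]'(by simp [pvApply, h]; omega) =
      if mask[i]'(by omega) then pvFlip cs[i] else cs[i] := by
  simp only [pvApply, List.getElem_zipWith, pvFlip]
  cases hb : mask[i]'(by omega) <;> simp

lemma pvApply_replicate_false (cs : List Char) :
    pvApply (List.replicate cs.length false) cs = cs := by
  induction cs with
  | nil => rfl
  | cons c cs ih => simp [pvApply, List.replicate_succ] at ih ⊢; exact ih

-- A's step at a valid position equals applying the toggled mask
lemma step_apply (cs : List Char) (mask : List Bool) (hm : mask.length = cs.length)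
    (p : Int) (hp : PySem.Raise.InRange cs.length p) :
    (if PySem.List.pyGetD (pvApply mask cs) p ' ' = '0' then
        PySem.List.pySetD (pvApply mask cs) p '1'
      else if PySem.List.pyGetD (pvApply mask cs) p ' ' = '1' then
        PySem.List.pySetD (pvApply mask cs) p '0'
      else pvApply mask cs)
      = pvApply (PySem.List.pySetD mask p (!(PySem.List.pyGetD mask p false))) cs := by
  have hlen : (pvApply mask cs).length = cs.length := pvApply_length mask cs hm
  have hp' : PySem.Raise.InRange (pvApply mask cs).length p := by rwa [hlen]
  have hpm : PySem.Raise.InRange mask.length p := by rwa [hm]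
  set t := pvIdx cs.length p with ht
  have htlt : t < cs.length := pvIdx_lt hp
  have htm : pvIdx mask.length p = t := by rw [hm]
  have hta : pvIdx (pvApply mask cs).length p = t := by rw [hlen]
  have htmlt : t < mask.length := by omega
  have hAt : t < (pvApply mask cs).length := by omega
  rw [pyGetD_eq_getD ' ' hp', pySetD_eq_set '1' hp', pySetD_eq_set '0' hp',
      pySetD_eq_set (!(PySem.List.pyGetD mask p false)) hpm,
      pyGetD_eq_getD false hpm, htm, hta]
  rw [List.getD_eq_getElem (pvApply mask cs) ' ' hAt,
      List.getD_eq_getElem mask false htmlt]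
  have key : (pvApply mask cs).set t (pvFlip ((pvApply mask cs)[t]'hAt)) =
      pvApply (mask.set t (!(mask[t]'htmlt))) cs := by
    apply List.ext_getElem
    · simp [pvApply, hm]
    · intro i h1 h2
      have hi : i < cs.length := by simpa [pvApply, hm] using h2
      have hit : i < mask.length := by omega
      rw [List.getElem_set]
      rw [pvApply_getElem (mask.set t (!(mask[t]'htmlt))) cs (by simp [hm]) hi]
      by_cases hti : t = i
      · subst hti
        rw [pvApply_getElem mask cs hm hi]
        cases hb : mask[t]'htmlt <;> simp [pvFlip_flip]
      · rw [if_neg hti, pvApply_getElem mask cs hm hi]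
        simp [hti]
  rw [← key]
  by_cases h0 : (pvApply mask cs)[t]'hAt = '0'
  · simp [h0, pvFlip]
  · by_cases h1 : (pvApply mask cs)[t]'hAt = '1'
    · simp [h1, pvFlip]
    · simp [h0, h1, pvFlip, List.set_getElem_self]

-- loop invariant: folding A's flips over a masked list = masking with the toggled fold
lemma fold_apply (cs : List Char) (ps : List Int)
    (hps : ∀ p ∈ ps, PySem.Raise.InRange cs.length p) :
    ∀ (mask : List Bool), mask.length = cs.length →
      ps.foldl
        (fun new p =>
          if PySem.List.pyGetD new p ' ' = '0' then PySem.List.pySetD new p '1'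
          else if PySem.List.pyGetD new p ' ' = '1' then PySem.List.pySetD new p '0'
          else new)
        (pvApply mask cs)
      = pvApply
          (ps.foldl
            (fun parity p =>
              PySem.List.pySetD parity p (!(PySem.List.pyGetD parity p false)))
            mask)
          cs := by
  induction ps with
  | nil => intro mask hm; rfl
  | cons p ps ih =>
    intro mask hm
    have hp : PySem.Raise.InRange cs.length p := hps p (List.mem_cons_self)
    have hpm : PySem.Raise.InRange mask.length p := by rwa [hm]
    simp only [List.foldl_cons]
    rw [step_apply cs mask hm p hp]
    exact ih (fun q hq => hps q (List.mem_cons_of_mem _ hq)) _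
      (by rw [pySetD_eq_set _ hpm]; simp [hm])

-- ===== VERDICT (by name: the statement is the Claim_ definition above) =====
theorem ins_error_spec : Claim_equal_ins_error := by
  intro frame list_of_bit _ hpre
  unfold Spec_ins_error ins_error ins_error_alt
  simp only []
  rw [PySem.List.foldl_pyRange_zero_pyGetD' list_of_bit 0
        (fun new p =>
          if PySem.List.pyGetD new p ' ' = '0' then PySem.List.pySetD new p '1'
          else if PySem.List.pyGetD new p ' ' = '1' then PySem.List.pySetD new p '0'
          else new)
        frame.toList]
  have := fold_apply frame.toList list_of_bit hpre
      (List.replicate frame.toList.length false) (by simp)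
  rw [pvApply_replicate_false] at this
  rw [this]
  rfl
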